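-- pv_equiv track=rewrite | github.com/MrHamdulay/csc3-capstone | examples/data/Assignment_4/mrcaye002/piglatin.py | my_own_2
-- ===== SOURCE A (Python) =====
-- def my_own_2(word):
--
-- 	a = len(word)
-- 	b = a - 3
-- 	c = word[b:]
-- 	d = a - 2
-- 	e = word[d:]
-- 	vowels = 'aeiouAEIOU'
--
-- 	if c == 'way':
--
-- 		eng_word = word[:b]
--
-- 		return(eng_word)
--
-- 	elif e == 'ay':
--
-- 		word_z = word[:d]
--
-- 		word_r = word_z[::-1]
--
-- 		z = 0
--
-- 		x = len(word_r)
--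
--
-- 		for run2 in word_r:
--
-- 			if run2 in vowels:
-- 				break
--
-- 			z += 1
--
-- 		constants = word_r[:z]
--
-- 		y = x - z - 1
--
-- 		constants_r = constants[::-1]
--
-- 		rest_of_letters = word_z[:y]
--
-- 		english = constants_r + rest_of_letters
--
-- 		return(english)
-- ===== SOURCE B (Python) =====
-- def my_own_2(word):
--     vowels = 'aeiouAEIOU'
--     if word.endswith('way'):
--         return word[:-3]
--     if word.endswith('ay'):
--         word_z = word[:-2]
--         j = -1
--         for v in vowels:
--             j = max(j, word_z.rfind(v))
--         return word_z[j + 1:] + word_z[:j]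
-- ===== Notes on version B (the rewrite author's own statement) =====
-- stated objective: simpler
-- what changed: B keeps the way/ay suffix dispatch but replaces A's double string reversal plus explicit consonant-counting loop with a rightmost-vowel search via str.rfind and two direct slices word_z[j+1:] + word_z[:j].
import Mathlib
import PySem

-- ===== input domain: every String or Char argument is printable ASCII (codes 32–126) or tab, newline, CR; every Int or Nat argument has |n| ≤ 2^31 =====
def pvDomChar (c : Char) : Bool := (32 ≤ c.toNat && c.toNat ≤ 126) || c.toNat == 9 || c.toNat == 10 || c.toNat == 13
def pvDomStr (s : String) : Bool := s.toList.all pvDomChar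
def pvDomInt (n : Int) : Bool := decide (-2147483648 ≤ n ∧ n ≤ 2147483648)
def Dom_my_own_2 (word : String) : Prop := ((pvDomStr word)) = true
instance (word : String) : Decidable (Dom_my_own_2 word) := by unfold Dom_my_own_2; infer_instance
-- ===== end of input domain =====

-- B replaces A's reverse-and-count-consonants ay-branch with a rightmost-vowel rfind and two slices (objective: simpler; return value only, no mutation involved).

-- ===== PORT A =====
-- A's counting loop: for run2 in word_r: if run2 in vowels: break; z += 1
def pvLoopZ_my_own_2 : List Char → Nat → Nat
  | [], z => z
  | run2 :: rest, z =>
    if PySem.Str.isIn (String.singleton run2) "aeiouAEIOU" then z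
    else pvLoopZ_my_own_2 rest (z + 1)

def my_own_2 (word : String) : Option String :=
  let a : Int := PySem.Str.len word
  let b : Int := a - 3
  let c : String := PySem.Str.slice word (some b) none
  let d : Int := a - 2
  let e : String := PySem.Str.slice word (some d) none
  if c == "way" then
    some (PySem.Str.slice word none (some b))
  else if e == "ay" then
    let word_z := PySem.Str.slice word none (some d)
    -- word_z[::-1]: step -1 always yields some, so getD is exact
    let word_r := (PySem.Str.slice? word_z none none (-1)).getD ""
    let z : Nat := pvLoopZ_my_own_2 word_r.toList 0
    let x : Int := PySem.Str.len word_r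
    let constants := PySem.Str.slice word_r none (some (z : Int))
    let y : Int := x - z - 1
    -- constants[::-1]
    let constants_r := (PySem.Str.slice? constants none none (-1)).getD ""
    let rest_of_letters := PySem.Str.slice word_z none (some y)
    some (constants_r ++ rest_of_letters)
  else
    none

-- ===== PORT B =====
def my_own_2_alt (word : String) : Option String :=
  let vowels := "aeiouAEIOU"
  if PySem.Str.endswith word "way" then
    some (PySem.Str.slice word none (some (-3)))
  else if PySem.Str.endswith word "ay" then
    let word_z := PySem.Str.slice word none (some (-2))
    let j : Int :=
      vowels.toList.foldl (fun j v => max j (PySem.Str.rfind word_z (String.singleton v))) (-1)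
    some (PySem.Str.slice word_z (some (j + 1)) none ++ PySem.Str.slice word_z none (some j))
  else
    none

-- ===== PRECONDITION & SPEC =====
def Spec_my_own_2 (word : String) (out : Option String) : Prop := out = my_own_2_alt word
instance (word : String) (out : Option String) : Decidable (Spec_my_own_2 word out) := by unfold Spec_my_own_2; infer_instance

-- ===== CLAIM (what is proved, stated in full; the proofs are below) =====
def Claim_equal_my_own_2 : Prop := ∀ (word : String), Dom_my_own_2 word → Spec_my_own_2 word (my_own_2 word)

-- ===== LEMMAS AND PROOFS =====

-- the vowel set, and the "is not a vowel" predicate driving A's loop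
def pvVow : List Char := "aeiouAEIOU".toList
def pvNotVow (c : Char) : Bool := !(pvVow.contains c)


theorem pv_isIn_singleton (c : Char) (s : String) :
    PySem.Str.isIn (String.singleton c) s = s.toList.contains c := by
  rw [PySem.Str.isIn_eq, Bool.eq_iff_iff, PySem.Chars.isIn_iff_infix]
  simp [List.infix_iff_prefix_suffix]
  constructor
  · rintro ⟨t, ht, hs⟩
    exact hs.subset (ht.subset (by simp))
  · intro h
    obtain ⟨l1, l2, he⟩ := List.mem_iff_append.mp h
    exact ⟨c :: l2, ⟨l2, rfl⟩, ⟨l1, he.symm⟩⟩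

theorem pv_prefix_single (v : Char) (xs : List Char) :
    [v].isPrefixOf xs = (xs.head? == some v) := by
  cases xs <;> simp [List.isPrefixOf, eq_comm]

theorem pv_takeWhile_getElem (p : Char → Bool) (cs : List Char) (k : Nat)
    (hk : k < (cs.takeWhile p).length) (hk' : k < cs.length) : p cs[k] = true := by
  have h := (List.takeWhile_prefix p (l := cs)).getElem (i := k) hk
  have := List.mem_takeWhile_imp (List.getElem_mem hk)
  rwa [h] at this

theorem pv_takeWhile_boundary (p : Char → Bool) (cs : List Char)
    (h : (cs.takeWhile p).length < cs.length) :
    p (cs[(cs.takeWhile p).length]'h) = false := by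
  induction cs with
  | nil => simp at h
  | cons c t ih =>
    by_cases hc : p c
    · simp only [List.takeWhile_cons, hc, if_true] at h ⊢
      simpa using ih (by simpa using h)
    · simp only [List.takeWhile_cons, hc] at h ⊢
      simpa using Bool.of_not_eq_true hc

theorem pv_foldl_max_le (xs : List Char) (f : Char → Int) (i c : Int)
    (hi : i ≤ c) (hf : ∀ x ∈ xs, f x ≤ c) :
    xs.foldl (fun a y => max a (f y)) i ≤ c := by
  induction xs generalizing i with
  | nil => simpa
  | cons x t ih =>
    simp only [List.foldl_cons]
    exact ih _ (max_le hi (hf x (by simp))) (fun y hy => hf y (by simp [hy]))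

theorem pv_loopZ_eq (cs : List Char) (z0 : Nat) :
    pvLoopZ_my_own_2 cs z0 = z0 + (cs.takeWhile pvNotVow).length := by
  induction cs generalizing z0 with
  | nil => simp [pvLoopZ_my_own_2]
  | cons c t ih =>
    rw [pvLoopZ_my_own_2, pv_isIn_singleton]
    have hn : pvNotVow c = !("aeiouAEIOU".toList.contains c) := rfl
    cases hcb : ("aeiouAEIOU".toList.contains c) with
    | true => rw [hcb] at hn; simp [hn]
    | false => rw [hcb] at hn; simp [hn, ih]; omega


theorem pv_go_cases (s : List Char) (v : Char) (n : Nat) :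
    PySem.Chars.rfind.go s [v] n = -1 ∨
      ∃ i : Nat, PySem.Chars.rfind.go s [v] n = (i : Int) ∧ s[i]? = some v ∧ i ≤ n := by
  induction n with
  | zero =>
    rw [PySem.Chars.rfind.go]
    split
    · right
      refine ⟨0, rfl, ?_, le_refl 0⟩
      rename_i h
      rw [pv_prefix_single] at h
      simpa [← List.head?_drop] using h
    · left; rfl
  | succ m ih =>
    rw [PySem.Chars.rfind.go]
    split
    · right
      refine ⟨m + 1, rfl, ?_, le_refl _⟩
      rename_i h
      rw [pv_prefix_single] at h
      simpa [← List.head?_drop] using h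
    · rcases ih with h | ⟨i, h1, h2, h3⟩
      · left; exact h
      · right; exact ⟨i, h1, h2, Nat.le_succ_of_le h3⟩

theorem pv_go_ge (s : List Char) (v : Char) (n k : Nat) (hk : k ≤ n)
    (h : s[k]? = some v) : (k : Int) ≤ PySem.Chars.rfind.go s [v] n := by
  induction n with
  | zero =>
    interval_cases k
    have hp : [v].isPrefixOf s = true := by
      rw [pv_prefix_single]
      simpa [← List.head?_drop] using h
    simp [PySem.Chars.rfind.go, hp]
  | succ m ih =>
    rw [PySem.Chars.rfind.go]
    split
    · exact_mod_cast Nat.cast_le.mpr hk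
    · rename_i hp
      rcases Nat.lt_or_ge k (m + 1) with hlt | hge
      · exact ih (Nat.lt_succ_iff.mp hlt)
      · exfalso
        have : k = m + 1 := le_antisymm hk hge
        subst this
        rw [pv_prefix_single] at hp
        rw [List.head?_drop] at hp
        simp [h] at hp

theorem pv_J_eq (zl : List Char) :
    pvVow.foldl (fun j v => max j (PySem.Chars.rfind zl [v])) (-1) =
      (zl.length : Int) - ((zl.reverse.takeWhile pvNotVow).length : Int) - 1 := by
  set n := zl.length with hn
  set z := (zl.reverse.takeWhile pvNotVow).length with hzdef
  have hz : z ≤ n := by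
    have := (List.takeWhile_prefix pvNotVow (l := zl.reverse)).length_le
    simpa [← hn] using this
  have hrfind : ∀ v, PySem.Chars.rfind zl [v] = PySem.Chars.rfind.go zl [v] n := fun v => rfl
  apply le_antisymm
  · apply pv_foldl_max_le
    · omega
    · intro v hv
      rw [hrfind]
      rcases pv_go_cases zl v n with h | ⟨i, h1, h2, h3⟩
      · rw [h]; omega
      · rw [h1]
        have hin : i < n := by
          have := List.getElem?_eq_some_iff.mp h2
          exact hn ▸ this.1
        by_contra hcon
        push Not at hcon
        have hk : n - 1 - i < z := by omega
        have hp := pv_takeWhile_getElem pvNotVow zl.reverse (n - 1 - i) (by omega)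
          (by simpa [← hn] using (by omega : n - 1 - i < n))
        rw [List.getElem_reverse] at hp
        have hidx : zl.length - 1 - (n - 1 - i) = i := by omega
        simp only [hidx] at hp
        have hv' : zl[i]'(hn ▸ hin) = v := (List.getElem?_eq_some_iff.mp h2).2
        rw [hv'] at hp
        simp [pvNotVow] at hp
        exact hp (by simpa [pvVow] using hv)
  · by_cases hzn : z = n
    · have h1 := (PySem.List.le_foldl_max_int pvVow (fun v => PySem.Chars.rfind zl [v]) (-1)).1
      calc ((n:Int) - z - 1) = -1 := by omega
        _ ≤ _ := h1
    · have hlt : z < n := lt_of_le_of_ne hz hzn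
      have hzr : z < zl.reverse.length := by simpa [← hn]
      have hb := pv_takeWhile_boundary pvNotVow zl.reverse (by simpa [← hn, hzdef] using hzr)
      set c0 := zl.reverse[z]'hzr with hc0
      have hmem : c0 ∈ pvVow := by
        have : pvNotVow c0 = false := hb
        simpa [pvNotVow] using this
      have hrev : c0 = zl[n - 1 - z]'(by omega) := by
        rw [hc0, List.getElem_reverse]
      have hge := pv_go_ge zl c0 n (n - 1 - z) (by omega)
        (by rw [List.getElem?_eq_some_iff]; exact ⟨by omega, hrev.symm⟩)
      have h2 := (PySem.List.le_foldl_max_int pvVow (fun v => PySem.Chars.rfind zl [v]) (-1)).2 c0 hmem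
      rw [hrfind] at h2
      have : ((n - 1 - z : Nat) : Int) = (n:Int) - z - 1 := by omega
      omega

theorem pv_cond_gen (word : String) (t : String) (k : Nat) (hk : t.toList.length = k) (hk0 : 0 < k) :
    (PySem.Str.slice word (some (PySem.Str.len word - (k:Int))) none == t) =
      PySem.Str.endswith word t := by
  rw [Bool.eq_iff_iff, beq_iff_eq, ← String.toList_inj, PySem.Str.endswith_eq,
    PySem.Chars.endswith_iff]
  simp only [PySem.Str.toList_slice, PySem.Chars.slice_eq_listSlice, PySem.Str.len_eq,
    PySem.List.slice_some_none]
  set l := word.toList with hl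
  set n := l.length with hn
  by_cases hkn : k ≤ n
  · have hcast : (n:Int) - k = ((n - k : Nat) : Int) := by omega
    rw [hcast, PySem.List.clampIdx_natCast]
    have hmin : min (n - k) n = n - k := by omega
    rw [hmin]
    rw [List.suffix_iff_eq_drop, hk]
    constructor
    · intro h; rw [← h]
    · intro h; rw [← h]
  · have hlen : (List.drop (PySem.List.clampIdx n ((n:Int) - k)) l).length < k := by
      have := PySem.List.clampIdx_le n ((n:Int) - k)
      simp only [List.length_drop, ← hn]
      omega
    constructor
    · intro h
      exfalso
      have := congrArg List.length h
      rw [hk] at this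
      omega
    · intro h
      exfalso
      have := h.length_le
      rw [hk] at this
      omega

theorem pv_take_eq (word : String) (k : Nat) (hk0 : 0 < k) (hk : k ≤ word.toList.length) :
    PySem.Str.slice word none (some (PySem.Str.len word - (k:Int))) =
      PySem.Str.slice word none (some (-(k:Int))) := by
  rw [← String.toList_inj]
  simp only [PySem.Str.toList_slice, PySem.Chars.slice_eq_listSlice, PySem.Str.len_eq]
  rw [PySem.List.slice_to_neg_natCast _ k hk0]
  have hcast : (word.toList.length : Int) - k = ((word.toList.length - k : Nat) : Int) := by omega
  rw [hcast, PySem.List.slice_to_natCast]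

set_option maxHeartbeats 1000000 in
theorem pv_ay_main (wz : String) :
    some ((PySem.Str.slice?
        (PySem.Str.slice ((PySem.Str.slice? wz none none (-1)).getD "") none
          (some ((pvLoopZ_my_own_2 ((PySem.Str.slice? wz none none (-1)).getD "").toList 0 : Nat) : Int)))
        none none (-1)).getD "" ++
      PySem.Str.slice wz none
        (some (PySem.Str.len ((PySem.Str.slice? wz none none (-1)).getD "") -
          ((pvLoopZ_my_own_2 ((PySem.Str.slice? wz none none (-1)).getD "").toList 0 : Nat) : Int) - 1))) =
    some (PySem.Str.slice wz
        (some ((List.foldl (fun j v => max j (PySem.Str.rfind wz (String.singleton v))) (-1) "aeiouAEIOU".toList) + 1)) none ++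
      PySem.Str.slice wz none
        (some (List.foldl (fun j v => max j (PySem.Str.rfind wz (String.singleton v))) (-1) "aeiouAEIOU".toList))) := by
  have hwr : (PySem.Str.slice? wz none none (-1)).getD "" = String.ofList wz.toList.reverse := by
    rw [PySem.Str.slice?_none_none_neg_one, Option.getD_some]
  rw [hwr]
  set zl := wz.toList with hzl
  set n := zl.length with hn
  rw [String.toList_ofList]
  set z := pvLoopZ_my_own_2 zl.reverse 0 with hzdef
  have hzval : z = (zl.reverse.takeWhile pvNotVow).length := by
    rw [hzdef, pv_loopZ_eq]; simp
  have hzle : z ≤ n := by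
    rw [hzval]
    have := (List.takeWhile_prefix pvNotVow (l := zl.reverse)).length_le
    simpa [← hn] using this
  have hlen : PySem.Str.len (String.ofList zl.reverse) = (n : Int) := by
    simp [PySem.Str.len_eq, ← hn]
  have hj : List.foldl (fun j v => max j (PySem.Str.rfind wz (String.singleton v))) (-1) "aeiouAEIOU".toList
      = (n : Int) - (z : Int) - 1 := by
    have hf : (fun (j : Int) (v : Char) => max j (PySem.Str.rfind wz (String.singleton v)))
        = (fun (j : Int) (v : Char) => max j (PySem.Chars.rfind zl [v])) := by
      funext j v
      rw [PySem.Str.rfind_eq, String.toList_singleton, ← hzl]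
    rw [hf]
    have := pv_J_eq zl
    rw [← hn, ← hzval] at this
    exact this
  rw [hj, hlen]
  rw [Option.some.injEq]
  rw [← String.toList_inj]
  simp only [String.toList_append]
  refine congrArg₂ HAppend.hAppend ?_ rfl
  rw [PySem.Str.slice?_none_none_neg_one, Option.getD_some, String.toList_ofList,
    PySem.Str.toList_slice, PySem.Chars.slice_eq_listSlice, String.toList_ofList,
    PySem.List.slice_to_natCast, PySem.Str.toList_slice, PySem.Chars.slice_eq_listSlice]
  rw [List.take_reverse, List.reverse_reverse]
  have hc : (n : Int) - (z : Int) - 1 + 1 = ((n - z : Nat) : Int) := by omega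
  rw [← hzl, ← hn, hc, PySem.List.slice_from_natCast]

-- ===== VERDICT (by name: the statement is the Claim_ definition above) =====
theorem my_own_2_spec : Claim_equal_my_own_2 := by
  intro word _
  unfold Spec_my_own_2 my_own_2 my_own_2_alt
  have hway := pv_cond_gen word "way" 3 rfl (by norm_num)
  have hay := pv_cond_gen word "ay" 2 rfl (by norm_num)
  rw [show ((3:Nat):Int) = 3 from rfl] at hway
  rw [show ((2:Nat):Int) = 2 from rfl] at hay
  simp only [hway, hay]
  by_cases hw : PySem.Str.endswith word "way"
  · simp only [hw, if_true]
    have h3 : 3 ≤ word.toList.length := by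
      rw [PySem.Str.endswith_eq, PySem.Chars.endswith_iff] at hw
      simpa using hw.length_le
    rw [show (3:Int) = ((3:Nat):Int) from rfl, pv_take_eq word 3 (by norm_num) h3]
  · simp only [hw, if_false, Bool.false_eq_true]
    by_cases ha : PySem.Str.endswith word "ay"
    · simp only [ha, if_true]
      have h2 : 2 ≤ word.toList.length := by
        rw [PySem.Str.endswith_eq, PySem.Chars.endswith_iff] at ha
        simpa using ha.length_le
      rw [show (2:Int) = ((2:Nat):Int) from rfl, pv_take_eq word 2 (by norm_num) h2]
      exact pv_ay_main _
    · rw [if_neg ha, if_neg ha]
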